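-- pv_equiv track=rewrite | github.com/zlflfl3-spec/- | app.py | renumber_groups
-- ===== SOURCE A (Python) =====
-- def renumber_groups(partition, isolated_nodes=None):
--     groups = {}
--     for node, gid in partition.items():
--         groups.setdefault(gid, []).append(node)
--     sorted_groups = sorted(groups.items(), key=lambda x: -len(x[1]))
--     new_part = {}
--     for new_id, (old_id, members) in enumerate(sorted_groups):
--         for m in members:
--             new_part[m] = f"G{new_id:02d}"
--     if isolated_nodes:
--         for n in isolated_nodes:
--             new_part[n] = "G_ISOLATED"
--     return new_part
-- ===== SOURCE B (Python) =====
-- def renumber_groups(partition, isolated_nodes=None):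
--     # counting sort of group ids by size (bucket per size, sizes scanned descending):
--     # no comparison sort and no per-group member lists; members emitted by filtering scans
--     counts = {}
--     for gid in partition.values():
--         counts[gid] = counts.get(gid, 0) + 1
--     buckets = {}
--     for gid, c in counts.items():
--         buckets.setdefault(c, []).append(gid)
--     new_part = {}
--     new_id = 0
--     for c in range(len(partition), 0, -1):
--         for gid in buckets.get(c, []):
--             lab = f"G{new_id:02d}"
--             for node, g in partition.items():
--                 if g == gid:
--                     new_part[node] = lab
--             new_id += 1
--     if isolated_nodes:
--         for n in isolated_nodes:
--             new_part[n] = "G_ISOLATED"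
--     return new_part
-- ===== Notes on version B (the rewrite author's own statement) =====
-- stated objective: alternative
-- what changed: B replaces A's comparison sort of (gid, member-list) pairs by a counting sort: it tallies group sizes in one pass, buckets the gids by size, scans the sizes from n down to 1 assigning labels, and emits each group's members by a filtering scan of the partition instead of materialising per-group member lists.
import Mathlib
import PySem

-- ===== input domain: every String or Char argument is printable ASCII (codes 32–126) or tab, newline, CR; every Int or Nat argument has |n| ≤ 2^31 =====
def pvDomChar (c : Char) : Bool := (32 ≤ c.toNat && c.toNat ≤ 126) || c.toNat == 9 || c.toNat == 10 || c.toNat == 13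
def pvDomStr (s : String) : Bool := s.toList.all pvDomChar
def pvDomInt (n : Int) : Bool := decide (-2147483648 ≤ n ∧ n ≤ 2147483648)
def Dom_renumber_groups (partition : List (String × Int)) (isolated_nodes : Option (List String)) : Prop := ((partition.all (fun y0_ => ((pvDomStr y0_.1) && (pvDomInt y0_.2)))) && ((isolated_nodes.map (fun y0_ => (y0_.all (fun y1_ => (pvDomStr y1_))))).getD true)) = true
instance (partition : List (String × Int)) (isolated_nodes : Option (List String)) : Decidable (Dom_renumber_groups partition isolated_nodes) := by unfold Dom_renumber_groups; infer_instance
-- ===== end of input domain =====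

-- B replaces A's comparison sort of per-group member lists by a counting sort over size
-- buckets with filtering emission scans; return values proved equal (alternative decomposition).

-- f"G{i:02d}" for i ≥ 0 (both Pythons contain this f-string; exact via PySem.Str.zfill)
def pvFmtLabel (i : Int) : String := "G" ++ PySem.Str.zfill (PySem.Int.toStr i) 2

-- ===== PORT A =====
def renumber_groups (partition : List (String × Int)) (isolated_nodes : Option (List String)) : List (String × String) :=
  -- groups.setdefault(gid, []).append(node)  ≡  modify gid [] (· ++ [node])
  let groups : PySem.Dict Int (List String) :=
    partition.foldl (fun g p => g.modify p.2 [] (fun ms => ms ++ [p.1])) PySem.Dict.empty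
  let sorted_groups := PySem.List.sorted groups.items (fun x => -(x.2.length : Int)) false
  let new_part : PySem.Dict String String :=
    (PySem.List.enumerate sorted_groups 0).foldl
      (fun d e => e.2.2.foldl (fun d m => d.insert m (pvFmtLabel e.1)) d) PySem.Dict.empty
  let new_part :=
    match isolated_nodes with
    | none => new_part
    | some l => if l.isEmpty then new_part
                else l.foldl (fun d n => d.insert n "G_ISOLATED") new_part
  new_part.items

-- ===== PORT B =====
def renumber_groups_alt (partition : List (String × Int)) (isolated_nodes : Option (List String)) : List (String × String) :=
  let counts : PySem.Dict Int Int :=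
    partition.foldl (fun c p => c.insert p.2 (c.getD p.2 0 + 1)) PySem.Dict.empty
  -- buckets.setdefault(c, []).append(gid)  ≡  modify c [] (· ++ [gid])
  let buckets : PySem.Dict Int (List Int) :=
    counts.items.foldl (fun b p => b.modify p.2 [] (fun gs => gs ++ [p.1])) PySem.Dict.empty
  -- for c in range(len(partition), 0, -1): for gid in buckets.get(c, []): …  new_id += 1
  let st :=
    (PySem.List.pyRange (partition.length : Int) 0 (-1)).foldl
      (fun (st : PySem.Dict String String × Int) c =>
        (buckets.getD c []).foldl
          (fun (st : PySem.Dict String String × Int) gid =>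
            let lab := pvFmtLabel st.2
            (partition.foldl (fun d p => if p.2 == gid then d.insert p.1 lab else d) st.1,
             st.2 + 1))
          st)
      (PySem.Dict.empty, 0)
  let new_part := st.1
  let new_part :=
    match isolated_nodes with
    | none => new_part
    | some l => if l.isEmpty then new_part
                else l.foldl (fun d n => d.insert n "G_ISOLATED") new_part
  new_part.items

-- ===== PRECONDITION & SPEC =====
def Spec_renumber_groups (partition : List (String × Int)) (isolated_nodes : Option (List String)) (out : List (String × String)) : Prop := out = renumber_groups_alt partition isolated_nodes
instance (partition : List (String × Int)) (isolated_nodes : Option (List String)) (out : List (String × String)) : Decidable (Spec_renumber_groups partition isolated_nodes out) := by unfold Spec_renumber_groups; infer_instance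

-- ===== CLAIM (what is proved, stated in full; the proofs are below) =====
def Claim_equal_renumber_groups : Prop := ∀ (partition : List (String × Int)) (isolated_nodes : Option (List String)), Dom_renumber_groups partition isolated_nodes → Spec_renumber_groups partition isolated_nodes (renumber_groups partition isolated_nodes)

-- ===== LEMMAS AND PROOFS =====
theorem pv_insertBy_map {α β : Type} (f : α → β) (bef : β → β → Bool) (x : α) (acc : List α) :
    (PySem.List.insertBy (fun a b => bef (f a) (f b)) x acc).map f
      = PySem.List.insertBy bef (f x) (acc.map f) := by
  induction acc with
  | nil => simp [PySem.List.insertBy]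
  | cons y ys ih =>
    by_cases h : bef (f x) (f y) = true
    · simp [PySem.List.insertBy, h]
    · simp only [Bool.not_eq_true] at h
      simp [PySem.List.insertBy, h, ih]

theorem pv_sorted_map {α β κ : Type} [LinearOrder κ] (f : α → β) (key : β → κ) (l : List α) :
    PySem.List.sorted (l.map f) key false
      = (PySem.List.sorted l (fun a => key (f a)) false).map f := by
  rw [PySem.List.sorted_eq_foldl_insertBy, PySem.List.sorted_eq_foldl_insertBy, List.foldl_map]
  have h : ∀ (acc : List α),
      l.foldl (fun acc x => PySem.List.insertBy (fun a b => decide (key a < key b)) (f x) acc) (acc.map f)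
        = (l.foldl (fun acc x => PySem.List.insertBy (fun a b => decide (key (f a) < key (f b))) x acc) acc).map f := by
    induction l with
    | nil => intro acc; simp
    | cons z zs ih =>
      intro acc
      simp only [List.foldl_cons]
      rw [← pv_insertBy_map f (fun a b => decide (key a < key b)) z acc, ih]
  have := h []
  simp only [List.map_nil] at this
  exact this

theorem pv_enumerate_map {α β : Type} (f : α → β) (l : List α) (s : Int) :
    PySem.List.enumerate (l.map f) s = (PySem.List.enumerate l s).map (fun e => (e.1, f e.2)) := by
  induction l generalizing s with
  | nil => simp [PySem.List.enumerate]
  | cons x xs ih => simp [PySem.List.enumerate_cons, ih]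

theorem pv_insertBy_append_not_before {α : Type} (bef : α → α → Bool) (x : α) (l1 l2 : List α)
    (h : ∀ y ∈ l1, bef x y = false) :
    PySem.List.insertBy bef x (l1 ++ l2) = l1 ++ PySem.List.insertBy bef x l2 := by
  induction l1 with
  | nil => simp
  | cons y ys ih =>
    have hy : bef x y = false := h y (by simp)
    cases l2 with
    | nil =>
      simp only [List.append_nil] at *
      rw [PySem.List.insertBy_of_forall_not_before bef x (y :: ys) h]
      simp [PySem.List.insertBy]
    | cons z t =>
      simp only [List.cons_append]
      show PySem.List.insertBy bef x (y :: (ys ++ z :: t)) = _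
      simp [PySem.List.insertBy, hy, ih (fun w hw => h w (by simp [hw]))]

theorem pv_insertBy_all_before {α : Type} (bef : α → α → Bool) (x : α) (l : List α)
    (h : ∀ y ∈ l, bef x y = true) :
    PySem.List.insertBy bef x l = x :: l := by
  cases l with
  | nil => simp [PySem.List.insertBy]
  | cons z t => simp [PySem.List.insertBy, h z (by simp)]

theorem pv_insertBy_blocks {α β : Type} [BEq β] [LawfulBEq β] (idx : β → Int) (k : α → β)
    (x : α) (ys : List α) :
    ∀ (ord : List β), ord.Pairwise (fun a b => idx a < idx b) → k x ∈ ord →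
    PySem.List.insertBy (fun a b => decide (idx (k a) < idx (k b))) x
        (ord.flatMap (fun g => ys.filter (fun y => k y == g)))
      = ord.flatMap (fun g => ys.filter (fun y => k y == g) ++ if k x == g then [x] else []) := by
  intro ord
  induction ord with
  | nil => intro _ hx; simp at hx
  | cons g0 rest ih =>
    intro hp hx
    have hhead : ∀ g ∈ rest, idx g0 < idx g := fun g hg => (List.pairwise_cons.mp hp).1 g hg
    have hrest : rest.Pairwise (fun a b => idx a < idx b) := (List.pairwise_cons.mp hp).2
    simp only [List.flatMap_cons]
    by_cases hkx : k x = g0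
    · have hb0 : ∀ y ∈ ys.filter (fun y => k y == g0),
          (decide (idx (k x) < idx (k y))) = false := by
        intro y hy
        have : k y = g0 := by simpa using (List.mem_filter.mp hy).2
        simp [hkx, this]
      rw [pv_insertBy_append_not_before _ _ _ _ hb0]
      have hall : ∀ z ∈ rest.flatMap (fun g => ys.filter (fun y => k y == g)),
          (decide (idx (k x) < idx (k z))) = true := by
        intro z hz
        obtain ⟨g, hg, hzf⟩ := List.mem_flatMap.mp hz
        have : k z = g := by simpa using (List.mem_filter.mp hzf).2
        simp [hkx, this]
        exact hhead g hg
      rw [pv_insertBy_all_before _ _ _ hall]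
      have hrest_if : rest.flatMap (fun g => ys.filter (fun y => k y == g) ++ if k x == g then [x] else [])
          = rest.flatMap (fun g => ys.filter (fun y => k y == g)) := by
        apply List.flatMap_congr
        intro g hg
        have hne : ¬ (k x == g) = true := by
          intro hgg
          have h1 : k x = g := by simpa using hgg
          have h2 := hhead g hg
          rw [← h1, hkx] at h2
          omega
        simp only [Bool.not_eq_true] at hne
        simp [hne]
      rw [hrest_if]
      simp [hkx]
    · have hxr : k x ∈ rest := by
        rcases List.mem_cons.mp hx with h | h
        · exact absurd h hkx
        · exact h
      have hb0 : ∀ y ∈ ys.filter (fun y => k y == g0),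
          (decide (idx (k x) < idx (k y))) = false := by
        intro y hy
        have hyg : k y = g0 := by simpa using (List.mem_filter.mp hy).2
        have := hhead (k x) hxr
        simp [hyg]
        omega
      rw [pv_insertBy_append_not_before _ _ _ _ hb0, ih hrest hxr]
      have : (k x == g0) = false := by simpa using hkx
      simp [this]

theorem pv_sorted_blocks {α β : Type} [BEq β] [LawfulBEq β] (idx : β → Int) (k : α → β)
    (ord : List β) (hord : ord.Pairwise (fun a b => idx a < idx b)) :
    ∀ (xs : List α), (∀ x ∈ xs, k x ∈ ord) →
    PySem.List.sorted xs (fun x => idx (k x)) false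
      = ord.flatMap (fun g => xs.filter (fun y => k y == g)) := by
  intro xs
  induction xs using List.reverseRecOn with
  | nil => intro _; simp [PySem.List.sorted]
  | append_singleton ys x ih =>
    intro hmem
    rw [PySem.List.sorted_eq_foldl_insertBy, List.foldl_append, List.foldl_cons, List.foldl_nil,
        ← PySem.List.sorted_eq_foldl_insertBy, ih (fun y hy => hmem y (by simp [hy]))]
    rw [pv_insertBy_blocks idx k x ys ord hord (hmem x (by simp))]
    apply List.flatMap_congr
    intro g _
    simp only [List.filter_append, List.filter_cons, List.filter_nil]

def pvF (P : List (String × Int)) (g : Int) : List String :=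
  (P.filter (fun p => p.2 == g)).map (·.1)

theorem pv_groups_items (P : List (String × Int)) :
    (P.foldl (fun g p => g.modify p.2 [] (fun ms => ms ++ [p.1])) (PySem.Dict.empty : PySem.Dict Int (List String))).items
      = (PySem.Set.ofList (P.map (·.2))).map (fun g => (g, pvF P g)) := by
  set d := P.foldl (fun g p => g.modify p.2 [] (fun ms => ms ++ [p.1])) (PySem.Dict.empty : PySem.Dict Int (List String)) with hd
  have hnd : d.keys.Nodup := by
    rw [hd]
    exact PySem.Dict.nodup_keys_foldl_modify_key P (fun p => p.2) [] (fun _ p ms => ms ++ [p.1]) _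
      (by simp)
  rw [PySem.Dict.items_eq_map_keys d hnd []]
  have hkeys : d.keys = PySem.Set.ofList (P.map (·.2)) := by
    rw [hd, PySem.Dict.keys_foldl_modify_key P (fun p => p.2) [] (fun _ p ms => ms ++ [p.1])]
    simp [PySem.Set.update, PySem.Set.ofList_eq_foldl, PySem.Dict.keys_empty]
  rw [hkeys]
  apply List.map_congr_left
  intro g _
  have hg : d.getD g [] = pvF P g := by
    rw [hd]
    have h : P.foldl (fun g p => g.modify p.2 [] (fun ms => ms ++ [p.1])) (PySem.Dict.empty : PySem.Dict Int (List String))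
        = (P.map (fun p => (p.2, p.1))).foldl (fun d p => d.modify p.1 [] (fun x => x ++ [p.2])) PySem.Dict.empty := by
      rw [List.foldl_map]
    rw [h, PySem.Dict.getD_foldl_modify_append]
    simp [pvF, PySem.Dict.getD_empty, List.filter_map, List.map_map, Function.comp_def]
  rw [hg]

theorem pv_counts_eq (P : List (String × Int)) :
    P.foldl (fun c p => c.insert p.2 (c.getD p.2 0 + 1)) (PySem.Dict.empty : PySem.Dict Int Int)
      = PySem.Dict.counter (P.map (·.2)) := by
  rw [← PySem.Dict.foldl_insert_getD_add_one_eq_counter, List.foldl_map]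

theorem pv_count_len (P : List (String × Int)) (g : Int) :
    ((P.map (·.2)).count g : Int) = ((pvF P g).length : Int) := by
  simp only [pvF, List.length_map, List.count_eq_countP, List.countP_map,
    ← List.countP_eq_length_filter, Function.comp_def]

-- the first-seen gid list, and A's sorted order of gids (descending size, ties first-seen)
def pvKeys (P : List (String × Int)) : List Int := PySem.Set.ofList (P.map (·.2))

def pvCnt (P : List (String × Int)) (g : Int) : Int :=
  (PySem.Dict.counter (P.map (·.2))).getD g 0

def pvOrder (P : List (String × Int)) : List Int :=
  PySem.List.sorted (pvKeys P) (fun g => -(pvCnt P g)) false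

theorem pv_hA (P : List (String × Int)) :
    PySem.List.sorted
        (P.foldl (fun g p => g.modify p.2 [] (fun ms => ms ++ [p.1])) (PySem.Dict.empty : PySem.Dict Int (List String))).items
        (fun x => -((x.2.length : Int))) false
      = (pvOrder P).map (fun g => (g, pvF P g)) := by
  rw [pv_groups_items P, pv_sorted_map (fun g => (g, pvF P g)) (fun x => -((x.2.length : Int)))]
  rw [pvOrder]
  have hkeq : (fun a : Int => -(((a, pvF P a) : Int × List String).2.length : Int))
      = (fun g : Int => -(pvCnt P g)) := by
    funext g
    show -((pvF P g).length : Int) = -(pvCnt P g)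
    rw [pvCnt, PySem.Dict.getD_counter, pv_count_len]
  rw [hkeq]
  rfl

-- counting sort: sizes n..1 with per-size buckets in first-seen order give exactly pvOrder
theorem pv_range_pairwise (n : Int) :
    (PySem.List.pyRange n 0 (-1)).Pairwise (fun a b => -a < -b) := by
  rw [PySem.List.pyRange_neg_one, List.pairwise_map]
  exact (List.pairwise_lt_range).imp (fun h => by omega)

theorem pv_cnt_mem_range (P : List (String × Int)) (g : Int) (hg : g ∈ pvKeys P) :
    pvCnt P g ∈ PySem.List.pyRange (P.length : Int) 0 (-1) := by
  rw [PySem.List.mem_pyRange_neg_one]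
  have hgv : g ∈ P.map (·.2) := by
    rw [pvKeys, PySem.Set.mem_ofList] at hg
    exact hg
  have h1 : 1 ≤ (P.map (·.2)).count g := List.one_le_count_iff.mpr hgv
  have h2 : (P.map (·.2)).count g ≤ (P.map (·.2)).length := List.count_le_length
  rw [pvCnt, PySem.Dict.getD_counter]
  simp only [List.length_map] at h2
  omega

theorem pv_order_blocks (P : List (String × Int)) :
    pvOrder P = (PySem.List.pyRange (P.length : Int) 0 (-1)).flatMap
      (fun c => (pvKeys P).filter (fun g => pvCnt P g == c)) := by
  rw [pvOrder]
  have h := pv_sorted_blocks (β := Int) (fun c => -c) (fun g : Int => pvCnt P g)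
    (PySem.List.pyRange (P.length : Int) 0 (-1)) (pv_range_pairwise _)
    (pvKeys P) (fun g hg => pv_cnt_mem_range P g hg)
  exact h

-- B's buckets dict: its value at c is the first-seen gids of count c
theorem pv_buckets_getD (P : List (String × Int)) (c : Int) :
    ((PySem.Dict.counter (P.map (·.2))).items.foldl
        (fun b p => b.modify p.2 [] (fun gs => gs ++ [p.1])) (PySem.Dict.empty : PySem.Dict Int (List Int))).getD c []
      = (pvKeys P).filter (fun g => pvCnt P g == c) := by
  have h : (PySem.Dict.counter (P.map (·.2))).items.foldl
        (fun b p => b.modify p.2 [] (fun gs => gs ++ [p.1])) (PySem.Dict.empty : PySem.Dict Int (List Int))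
      = ((PySem.Dict.counter (P.map (·.2))).items.map (fun p => (p.2, p.1))).foldl
        (fun d p => d.modify p.1 [] (fun x => x ++ [p.2])) PySem.Dict.empty := by
    rw [List.foldl_map]
  rw [h, PySem.Dict.getD_foldl_modify_append]
  have hitems : (PySem.Dict.counter (P.map (·.2))).items
      = (pvKeys P).map (fun k => (k, pvCnt P k)) := by
    rw [PySem.Dict.items_eq_map_keys _ (PySem.Dict.nodup_keys_counter _) 0,
        PySem.Dict.keys_counter]
    rfl
  rw [hitems]
  simp [PySem.Dict.getD_empty, List.filter_map, List.map_map, Function.comp_def]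

-- a fold whose state carries a counter equals a fold over enumerate
theorem pv_foldl_counter {α σ : Type} (f : σ → Int → α → σ) (l : List α) :
    ∀ (s : σ) (i : Int),
    l.foldl (fun (st : σ × Int) x => (f st.1 st.2 x, st.2 + 1)) (s, i)
      = ((PySem.List.enumerate l i).foldl (fun d e => f d e.1 e.2) s, i + l.length) := by
  induction l with
  | nil => intro s i; simp [PySem.List.enumerate]
  | cons x xs ih =>
    intro s i
    simp only [List.foldl_cons, PySem.List.enumerate_cons, List.length_cons]
    rw [ih]
    simp only [Prod.mk.injEq, true_and]
    push_cast
    omega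

theorem pv_main (P : List (String × Int)) (iso : Option (List String)) :
    renumber_groups P iso = renumber_groups_alt P iso := by
  unfold renumber_groups renumber_groups_alt
  simp only []
  rw [pv_counts_eq P]
  have hN :
      (PySem.List.enumerate (PySem.List.sorted
          (P.foldl (fun g p => g.modify p.2 [] (fun ms => ms ++ [p.1])) (PySem.Dict.empty : PySem.Dict Int (List String))).items
          (fun x => -((x.2.length : Int))) false) 0).foldl
        (fun d e => e.2.2.foldl (fun d m => d.insert m (pvFmtLabel e.1)) d) PySem.Dict.empty
      = ((PySem.List.pyRange (P.length : Int) 0 (-1)).foldl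
          (fun (st : PySem.Dict String String × Int) c =>
            (((PySem.Dict.counter (P.map (·.2))).items.foldl
                (fun b p => b.modify p.2 [] (fun gs => gs ++ [p.1])) PySem.Dict.empty).getD c []).foldl
              (fun (st : PySem.Dict String String × Int) gid =>
                (P.foldl (fun d p => if p.2 == gid then d.insert p.1 (pvFmtLabel st.2) else d) st.1,
                 st.2 + 1))
              st)
          (PySem.Dict.empty, 0)).1 := by
    -- A side: fold over the enumerated sorted order, members emitted by a filtering fold
    have hAside :
        (PySem.List.enumerate (PySem.List.sorted
            (P.foldl (fun g p => g.modify p.2 [] (fun ms => ms ++ [p.1])) (PySem.Dict.empty : PySem.Dict Int (List String))).items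
            (fun x => -((x.2.length : Int))) false) 0).foldl
          (fun d e => e.2.2.foldl (fun d m => d.insert m (pvFmtLabel e.1)) d) PySem.Dict.empty
        = (PySem.List.enumerate (pvOrder P) 0).foldl
            (fun d e => P.foldl (fun d p => if p.2 == e.2 then d.insert p.1 (pvFmtLabel e.1) else d) d)
            PySem.Dict.empty := by
      rw [pv_hA P, pv_enumerate_map, List.foldl_map]
      show (PySem.List.enumerate (pvOrder P) 0).foldl
          (fun d e => (pvF P e.2).foldl (fun d m => d.insert m (pvFmtLabel e.1)) d) PySem.Dict.empty = _
      have hstep : (fun (d : PySem.Dict String String) (e : Int × Int) =>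
            (pvF P e.2).foldl (fun d m => d.insert m (pvFmtLabel e.1)) d)
          = (fun d e => P.foldl (fun d p => if p.2 == e.2 then d.insert p.1 (pvFmtLabel e.1) else d) d) := by
        funext d e
        rw [pvF, List.foldl_map, List.foldl_filter]
      rw [hstep]
    -- B side: flatten the bucket loops, then turn the running counter into enumerate
    have hBside :
        ((PySem.List.pyRange (P.length : Int) 0 (-1)).foldl
          (fun (st : PySem.Dict String String × Int) c =>
            (((PySem.Dict.counter (P.map (·.2))).items.foldl
                (fun b p => b.modify p.2 [] (fun gs => gs ++ [p.1])) PySem.Dict.empty).getD c []).foldl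
              (fun (st : PySem.Dict String String × Int) gid =>
                (P.foldl (fun d p => if p.2 == gid then d.insert p.1 (pvFmtLabel st.2) else d) st.1,
                 st.2 + 1))
              st)
          (PySem.Dict.empty, 0)).1
        = (PySem.List.enumerate (pvOrder P) 0).foldl
            (fun d e => P.foldl (fun d p => if p.2 == e.2 then d.insert p.1 (pvFmtLabel e.1) else d) d)
            PySem.Dict.empty := by
      have e1 : (fun (st : PySem.Dict String String × Int) c =>
            (((PySem.Dict.counter (P.map (·.2))).items.foldl
                (fun b p => b.modify p.2 [] (fun gs => gs ++ [p.1])) PySem.Dict.empty).getD c []).foldl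
              (fun (st : PySem.Dict String String × Int) gid =>
                (P.foldl (fun d p => if p.2 == gid then d.insert p.1 (pvFmtLabel st.2) else d) st.1,
                 st.2 + 1))
              st)
          = (fun st c =>
            ((pvKeys P).filter (fun g => pvCnt P g == c)).foldl
              (fun (st : PySem.Dict String String × Int) gid =>
                (P.foldl (fun d p => if p.2 == gid then d.insert p.1 (pvFmtLabel st.2) else d) st.1,
                 st.2 + 1))
              st) := by
        funext st c
        rw [pv_buckets_getD]
      rw [e1, ← List.foldl_flatMap, ← pv_order_blocks P]
      exact congrArg Prod.fst (pv_foldl_counter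
        (fun d i gid => P.foldl (fun d p => if p.2 == gid then d.insert p.1 (pvFmtLabel i) else d) d)
        (pvOrder P) PySem.Dict.empty 0)
    rw [hAside, hBside]
  rw [hN]

-- ===== VERDICT (by name: the statement is the Claim_ definition above) =====
theorem renumber_groups_spec : Claim_equal_renumber_groups := by
  intro partition isolated_nodes _
  unfold Spec_renumber_groups
  exact pv_main partition isolated_nodes
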